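-- pv_equiv track=rewrite | github.com/howard8888/workspace | cca8_navpatch.py | _sorted_unique_strs
-- ===== SOURCE A (Python) =====
-- from typing import Any, Dict, Iterable, List, Optional, Tuple
--
-- def _sorted_unique_strs(xs: Iterable[Any]) -> List[str]:
--     out: List[str] = []
--     seen: set[str] = set()
--     for x in xs:
--         if not isinstance(x, str):
--             continue
--         s = x.strip()
--         if not s or s in seen:
--             continue
--         seen.add(s)
--         out.append(s)
--     out.sort()
--     return out
-- ===== SOURCE B (Python) =====
-- from typing import Any, Iterable, List
--
-- def _sorted_unique_strs(xs: Iterable[Any]) -> List[str]: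
--     cand = sorted(x.strip() for x in xs if isinstance(x, str))
--     out: List[str] = []
--     for s in cand:
--         if s and (not out or out[-1] != s):
--             out.append(s)
--     return out
-- ===== Notes on version B (the rewrite author's own statement) =====
-- stated objective: alternative
-- what changed: B replaces A's incremental hash-set dedup (filter-dedup-then-sort) by sort-first-then-adjacent-dedup: sort all stripped strings and emit each non-empty one only when it differs from the previously emitted one, so no seen-set is maintained.
import Mathlib
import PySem

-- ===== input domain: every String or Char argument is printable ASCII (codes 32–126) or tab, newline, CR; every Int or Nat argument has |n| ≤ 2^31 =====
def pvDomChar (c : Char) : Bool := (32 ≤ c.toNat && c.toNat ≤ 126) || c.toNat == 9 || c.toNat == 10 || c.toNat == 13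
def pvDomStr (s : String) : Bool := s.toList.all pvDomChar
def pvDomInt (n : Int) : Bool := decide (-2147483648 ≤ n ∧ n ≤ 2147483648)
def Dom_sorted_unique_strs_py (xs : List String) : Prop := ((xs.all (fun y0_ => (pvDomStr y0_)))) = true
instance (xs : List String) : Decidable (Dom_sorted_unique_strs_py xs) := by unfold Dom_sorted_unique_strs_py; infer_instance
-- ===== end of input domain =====

-- B replaces A's incremental seen-set dedup by sort-then-adjacent-dedup (a different decomposition, similar cost).
-- On List String the 'isinstance(x, str)' guard of A and B's generator filter are identically always-true and are not ported.

-- ===== PORT A =====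
-- loop body of A: s = x.strip(); skip if empty or already seen, else record in seen and append to out
def aStep (acc : List String × PySem.Set String) (x : String) : List String × PySem.Set String :=
  let s := PySem.Str.strip x
  if s = "" ∨ PySem.Set.contains acc.2 s then acc
  else (acc.1 ++ [s], PySem.Set.add acc.2 s)

def sorted_unique_strs_py (xs : List String) : List String :=
  PySem.List.sorted (xs.foldl aStep ([], PySem.Set.empty)).1 (fun y => y) false

-- ===== PORT B =====
-- loop body of B: append s when non-empty and different from the last emitted string
def bStep (out : List String) (s : String) : List String :=
  if s ≠ "" ∧ (out = [] ∨ out.getLast? ≠ some s) then out ++ [s] else out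

def sorted_unique_strs_py_alt (xs : List String) : List String :=
  (PySem.List.sorted (xs.map (fun x => PySem.Str.strip x)) (fun y => y) false).foldl bStep []

-- ===== PRECONDITION & SPEC =====
def Spec_sorted_unique_strs_py (xs : List String) (out : List String) : Prop := out = sorted_unique_strs_py_alt xs
instance (xs : List String) (out : List String) : Decidable (Spec_sorted_unique_strs_py xs out) := by unfold Spec_sorted_unique_strs_py; infer_instance

-- ===== CLAIM (what is proved, stated in full; the proofs are below) =====
def Claim_equal_sorted_unique_strs_py : Prop := ∀ (xs : List String), Dom_sorted_unique_strs_py xs → Spec_sorted_unique_strs_py xs (sorted_unique_strs_py xs)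

-- ===== LEMMAS AND PROOFS =====

-- A's loop: its out-list is nodup, empty-free, and holds exactly the non-empty strips of xs (plus the seed)
lemma a_fold_spec (xs : List String) : ∀ (out seen : List String),
    out.Nodup → (∀ a, a ∈ seen ↔ a ∈ out) → (∀ a ∈ out, a ≠ "") →
    (xs.foldl aStep (out, seen)).1.Nodup ∧
    (∀ a ∈ (xs.foldl aStep (out, seen)).1, a ≠ "") ∧
    (∀ a, a ∈ (xs.foldl aStep (out, seen)).1 ↔
      a ∈ out ∨ ((∃ x ∈ xs, PySem.Str.strip x = a) ∧ a ≠ "")) := by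
  induction xs with
  | nil => intro out seen hnd hiff hne; simp_all
  | cons x rest ih =>
    intro out seen hnd hiff hne
    simp only [List.foldl_cons, aStep]
    by_cases hskip : PySem.Str.strip x = "" ∨ PySem.Set.contains seen (PySem.Str.strip x)
    · rw [if_pos hskip]
      obtain ⟨h1, h2, h3⟩ := ih out seen hnd hiff hne
      refine ⟨h1, h2, fun a => ?_⟩
      rw [h3]
      rcases hskip with hs | hs
      · constructor
        · rintro (h | ⟨⟨y, hy, hsy⟩, hne'⟩)
          · exact Or.inl h
          · exact Or.inr ⟨⟨y, List.mem_cons_of_mem _ hy, hsy⟩, hne'⟩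
        · rintro (h | ⟨⟨y, hy, hsy⟩, hne'⟩)
          · exact Or.inl h
          · rcases List.mem_cons.mp hy with rfl | hy'
            · exact absurd (hs ▸ hsy) (Ne.symm hne')
            · exact Or.inr ⟨⟨y, hy', hsy⟩, hne'⟩
      · have hsx : PySem.Str.strip x ∈ out := by
          have : PySem.Str.strip x ∈ seen := by
            simpa [PySem.Set.contains, List.contains_iff_mem] using hs
          exact (hiff _).mp this
        constructor
        · rintro (h | ⟨⟨y, hy, hsy⟩, hne'⟩)
          · exact Or.inl h
          · exact Or.inr ⟨⟨y, List.mem_cons_of_mem _ hy, hsy⟩, hne'⟩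
        · rintro (h | ⟨⟨y, hy, hsy⟩, hne'⟩)
          · exact Or.inl h
          · rcases List.mem_cons.mp hy with rfl | hy'
            · exact Or.inl (hsy ▸ hsx)
            · exact Or.inr ⟨⟨y, hy', hsy⟩, hne'⟩
    · rw [if_neg hskip]
      push_neg at hskip
      obtain ⟨hsne, hnc⟩ := hskip
      have hnotmem : PySem.Str.strip x ∉ out := by
        intro h
        exact hnc (by simpa [PySem.Set.contains, List.contains_iff_mem] using (hiff _).mpr h)
      have hnd' : (out ++ [PySem.Str.strip x]).Nodup := by
        simp only [List.nodup_append, List.nodup_singleton, true_and]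
        refine ⟨hnd, ?_⟩
        intro a ha b hb
        rw [List.mem_singleton] at hb
        subst hb
        rintro rfl
        exact hnotmem ha
      have hiff' : ∀ a, a ∈ PySem.Set.add seen (PySem.Str.strip x) ↔ a ∈ out ++ [PySem.Str.strip x] := by
        intro a
        have hnm : PySem.Str.strip x ∉ seen := fun h => hnotmem ((hiff _).mp h)
        simp [PySem.Set.add, hnm, hiff a]
      have hne' : ∀ a ∈ out ++ [PySem.Str.strip x], a ≠ "" := by
        intro a ha
        rcases List.mem_append.mp ha with h | h
        · exact hne a h
        · simp at h; subst h; exact hsne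
      obtain ⟨h1, h2, h3⟩ := ih _ _ hnd' hiff' hne'
      refine ⟨h1, h2, fun a => ?_⟩
      rw [h3]
      constructor
      · rintro (h | ⟨⟨y, hy, hsy⟩, hne2⟩)
        · rcases List.mem_append.mp h with h' | h'
          · exact Or.inl h'
          · simp at h'; subst h'
            exact Or.inr ⟨⟨x, List.mem_cons_self, rfl⟩, hsne⟩
        · exact Or.inr ⟨⟨y, List.mem_cons_of_mem _ hy, hsy⟩, hne2⟩
      · rintro (h | ⟨⟨y, hy, hsy⟩, hne2⟩)
        · exact Or.inl (List.mem_append.mpr (Or.inl h))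
        · rcases List.mem_cons.mp hy with rfl | hy'
          · exact Or.inl (List.mem_append.mpr (Or.inr (by simp [hsy])))
          · exact Or.inr ⟨⟨y, hy', hsy⟩, hne2⟩

-- in a strictly increasing list every element is ≤ the last one
lemma le_getLast?_of_pairwise_lt (l : List String) (hl : l.Pairwise (· < ·)) :
    ∀ a ∈ l, ∀ b, l.getLast? = some b → a ≤ b := by
  induction l with
  | nil => simp
  | cons c t ih =>
    intro a ha b hb
    rcases List.pairwise_cons.mp hl with ⟨hc, ht⟩
    cases t with
    | nil =>
      simp at ha hb; subst ha; subst hb; exact le_refl _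
    | cons d t' =>
      have hb' : (d :: t').getLast? = some b := by
        simpa [List.getLast?_cons_cons] using hb
      rcases List.mem_cons.mp ha with rfl | ha'
      · have hd : a < d := hc d List.mem_cons_self
        have := ih ht d (List.mem_cons_self) b hb'
        exact le_trans (le_of_lt hd) this
      · exact ih ht a ha' b hb'

-- B's loop over a ≤-sorted list: result is strictly increasing, empty-free, holds the non-empty elements
lemma b_fold_spec (cs : List String) : ∀ (acc : List String),
    acc.Pairwise (· < ·) → (∀ a ∈ acc, a ≠ "") →
    cs.Pairwise (· ≤ ·) → (∀ a ∈ acc, ∀ c ∈ cs, a ≤ c) →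
    (cs.foldl bStep acc).Pairwise (· < ·) ∧
    (∀ a ∈ cs.foldl bStep acc, a ≠ "") ∧
    (∀ a, a ∈ cs.foldl bStep acc ↔ a ∈ acc ∨ (a ∈ cs ∧ a ≠ "")) := by
  induction cs with
  | nil => intro acc h1 h2 _ _; simp_all
  | cons c rest ih =>
    intro acc hpw hne hcs hle
    rcases List.pairwise_cons.mp hcs with ⟨hcrest, hrest⟩
    simp only [List.foldl_cons, bStep]
    by_cases hcond : c ≠ "" ∧ (acc = [] ∨ acc.getLast? ≠ some c)
    · rw [if_pos hcond]
      obtain ⟨hcne, hlast⟩ := hcond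
      have hlt : ∀ a ∈ acc, a < c := by
        intro a ha
        have hlec : a ≤ c := hle a ha c List.mem_cons_self
        rcases lt_or_eq_of_le hlec with h | rfl
        · exact h
        · exfalso
          rcases hlast with h0 | h0
          · subst h0; simp at ha
          · have hnenil : acc ≠ [] := List.ne_nil_of_mem ha
            cases hb : acc.getLast? with
            | none => rw [List.getLast?_eq_none_iff] at hb; exact hnenil hb
            | some b =>
              have hab : a ≤ b := le_getLast?_of_pairwise_lt acc hpw a ha b hb
              have hbmem : b ∈ acc := List.mem_of_getLast? hb
              have hbc : b ≤ a := hle b hbmem a List.mem_cons_self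
              have : b = a := le_antisymm hbc hab
              exact h0 (this ▸ hb)
      have hpw' : (acc ++ [c]).Pairwise (· < ·) := by
        rw [List.pairwise_append]
        exact ⟨hpw, List.pairwise_singleton _ _, by intro a ha b hb; simp at hb; subst hb; exact hlt a ha⟩
      have hne' : ∀ a ∈ acc ++ [c], a ≠ "" := by
        intro a ha
        rcases List.mem_append.mp ha with h | h
        · exact hne a h
        · simp at h; subst h; exact hcne
      have hle' : ∀ a ∈ acc ++ [c], ∀ b ∈ rest, a ≤ b := by
        intro a ha b hb
        rcases List.mem_append.mp ha with h | h
        · exact hle a h b (List.mem_cons_of_mem _ hb)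
        · simp at h; subst h; exact hcrest b hb
      obtain ⟨h1, h2, h3⟩ := ih _ hpw' hne' hrest hle'
      refine ⟨h1, h2, fun a => ?_⟩
      rw [h3]
      constructor
      · rintro (h | ⟨h, hne2⟩)
        · rcases List.mem_append.mp h with h' | h'
          · exact Or.inl h'
          · simp at h'; subst h'; exact Or.inr ⟨List.mem_cons_self, hcne⟩
        · exact Or.inr ⟨List.mem_cons_of_mem _ h, hne2⟩
      · rintro (h | ⟨h, hne2⟩)
        · exact Or.inl (List.mem_append.mpr (Or.inl h))
        · rcases List.mem_cons.mp h with rfl | h'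
          · exact Or.inl (List.mem_append.mpr (Or.inr (by simp)))
          · exact Or.inr ⟨h', hne2⟩
    · rw [if_neg hcond]
      have hle' : ∀ a ∈ acc, ∀ b ∈ rest, a ≤ b := by
        intro a ha b hb; exact hle a ha b (List.mem_cons_of_mem _ hb)
      obtain ⟨h1, h2, h3⟩ := ih _ hpw hne hrest hle'
      refine ⟨h1, h2, fun a => ?_⟩
      rw [h3]
      push_neg at hcond
      by_cases hceq : c = ""
      · subst hceq
        constructor
        · rintro (h | ⟨h, hne2⟩)
          · exact Or.inl h
          · exact Or.inr ⟨List.mem_cons_of_mem _ h, hne2⟩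
        · rintro (h | ⟨h, hne2⟩)
          · exact Or.inl h
          · rcases List.mem_cons.mp h with rfl | h'
            · exact absurd rfl hne2
            · exact Or.inr ⟨h', hne2⟩
      · obtain ⟨hnenil, hlastc⟩ := hcond hceq
        have hcmem : c ∈ acc := List.mem_of_getLast? hlastc
        constructor
        · rintro (h | ⟨h, hne2⟩)
          · exact Or.inl h
          · exact Or.inr ⟨List.mem_cons_of_mem _ h, hne2⟩
        · rintro (h | ⟨h, hne2⟩)
          · exact Or.inl h
          · rcases List.mem_cons.mp h with rfl | h'
            · exact Or.inl hcmem
            · exact Or.inr ⟨h', hne2⟩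

-- ===== VERDICT (by name: the statement is the Claim_ definition above) =====
theorem sorted_unique_strs_py_spec : Claim_equal_sorted_unique_strs_py := by
  intro xs _
  unfold Spec_sorted_unique_strs_py sorted_unique_strs_py sorted_unique_strs_py_alt
  set A1 := (xs.foldl aStep ([], PySem.Set.empty)).1 with hA1
  set cs := PySem.List.sorted (xs.map (fun x => PySem.Str.strip x)) (fun y => y) false with hcs
  have hAspec := a_fold_spec xs [] PySem.Set.empty (by simp) (by simp [PySem.Set.empty]) (by simp)
  obtain ⟨hAnd, hAne, hAmem⟩ := hAspec
  have hcspw : cs.Pairwise (· ≤ ·) := by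
    have := PySem.List.sorted_pairwise (xs := xs.map (fun x => PySem.Str.strip x)) (key := fun y => y)
    simpa using this
  have hBspec := b_fold_spec cs [] (by simp) (by simp) hcspw (by simp)
  obtain ⟨hBpw, hBne, hBmem⟩ := hBspec
  set B := cs.foldl bStep [] with hB
  have hmemiff : ∀ a, a ∈ B ↔ a ∈ A1 := by
    intro a
    rw [hBmem a, hAmem a]
    simp only [List.mem_nil_iff, false_or]
    constructor
    · rintro ⟨hac, hne2⟩
      have : a ∈ xs.map (fun x => PySem.Str.strip x) := (PySem.List.mem_sorted _ _ _ _).mp hac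
      obtain ⟨y, hy, hsy⟩ := List.mem_map.mp this
      exact ⟨⟨y, hy, hsy⟩, hne2⟩
    · rintro ⟨⟨y, hy, hsy⟩, hne2⟩
      refine ⟨(PySem.List.mem_sorted _ _ _ _).mpr ?_, hne2⟩
      exact List.mem_map.mpr ⟨y, hy, hsy⟩
  have hBnd : B.Nodup := hBpw.imp (fun h => ne_of_lt h)
  have hperm : B.Perm A1 := (List.perm_ext_iff_of_nodup hBnd hAnd).mpr hmemiff
  exact PySem.List.sorted_eq_of_perm_of_pairwise_lt A1 B (fun y => y) hperm hBpw
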